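-- pv_equiv track=rewrite | github.com/AntonJansen96/projectEuler | 51-100/62.py | cubelist
-- ===== SOURCE A (Python) =====
-- def cubelist(digits):
-- 	cubes = []
-- 	n = 1
-- 	while True:
-- 		if len(str(n**3)) == digits:
-- 			cubes.append(n**3)
-- 		if len(str(n**3)) > digits:
-- 			break
-- 		n += 1
-- 	return cubes
-- ===== SOURCE B (Python) =====
-- def icbrt(x):
--     # largest r >= 0 with r**3 <= x (requires x >= 0); pure integer bisection
--     lo, hi = 0, x + 1          # invariant: lo**3 <= x < hi**3
--     while lo + 1 < hi:
--         mid = (lo + hi) // 2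
--         if mid ** 3 <= x:
--             lo = mid
--         else:
--             hi = mid
--     return lo
--
-- def cubelist(digits):
--     if digits <= 0:
--         return []
--     first = icbrt(10 ** (digits - 1) - 1) + 1   # smallest n with n**3 >= 10**(digits-1)
--     last = icbrt(10 ** digits - 1)              # largest n with n**3 <= 10**digits - 1
--     return [n ** 3 for n in range(first, last + 1)]
-- ===== Notes on version B (the rewrite author's own statement) =====
-- stated objective: alternative
-- what changed: B replaces A's linear scan over n with a string-length digit test by a direct bound computation: an integer cube root found by bisection gives the first and last n whose cubes have the requested digit count, and the result is one map over that range.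
import Mathlib
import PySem

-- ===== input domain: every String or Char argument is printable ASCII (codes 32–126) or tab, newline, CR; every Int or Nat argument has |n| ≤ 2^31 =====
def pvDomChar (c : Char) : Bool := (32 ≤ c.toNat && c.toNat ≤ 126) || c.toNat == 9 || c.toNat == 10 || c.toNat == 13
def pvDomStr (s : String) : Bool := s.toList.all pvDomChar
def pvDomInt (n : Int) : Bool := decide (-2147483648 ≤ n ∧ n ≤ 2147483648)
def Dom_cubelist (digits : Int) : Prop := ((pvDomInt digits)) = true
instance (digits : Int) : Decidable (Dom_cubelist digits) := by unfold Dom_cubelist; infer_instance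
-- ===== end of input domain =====

-- B computes the cube range bounds with an integer cube root (bisection) and maps once over that
-- range, instead of A's linear scan testing the string length of every cube (objective: alternative).


-- ===== PORT A =====
-- len(str(m))
def pyNumLen (m : Int) : Int := PySem.Str.len (PySem.Int.toStr m)

-- general fact needed for A's termination: decimal length = log₁₀ + 1 (proved, not in Mathlib)
theorem pvToDigitsCore_length (f : Nat) : ∀ (n : Nat) (l : List Char), n < f →
    (Nat.toDigitsCore 10 f n l).length = Nat.log 10 n + 1 + l.length := by
  induction f with
  | zero => omega
  | succ f ih =>
    intro n l h
    simp only [Nat.toDigitsCore]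
    by_cases hx : n / 10 = 0
    · have hn : n < 10 := by omega
      simp [hx, Nat.log_eq_zero_iff.mpr (Or.inl hn)]
      omega
    · have hn10 : 10 ≤ n := by omega
      have hlt : n / 10 < f := by
        have := Nat.div_lt_self (by omega : 0 < n) (by omega : 1 < 10)
        omega
      rw [if_neg hx, ih (n / 10) _ hlt]
      have h1 := Nat.log_div_base 10 n
      have h2 := Nat.log_pos (by omega : 1 < 10) hn10
      simp only [List.length_cons]
      omega

theorem pvToDigits_length (n : Nat) :
    (Nat.toDigits 10 n).length = Nat.log 10 n + 1 :=
  by simpa using pvToDigitsCore_length (n + 1) n [] (by omega)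

theorem pyNumLen_eq_log (m : Int) (hm : 0 ≤ m) :
    pyNumLen m = (Nat.log 10 m.toNat : Int) + 1 := by
  simp only [pyNumLen, PySem.Str.len_eq, PySem.Int.toList_toStr, PySem.Int.toChars,
    if_neg (by omega : ¬ m < 0), pvToDigits_length]
  push_cast
  ring

-- termination helper for A's while-loop: if len(str(n**3)) <= digits then n ≤ 10^digits
theorem cubelist_loop_bound (digits n : Int) (h : pyNumLen (n ^ 3) ≤ digits) :
    n ≤ (10 : Int) ^ digits.toNat := by
  by_cases hn' : n ≤ 0
  · exact hn'.trans (by positivity)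
  · have hn : 0 < n := by omega
    have hm : (1 : Int) ≤ n ^ 3 := one_le_pow₀ hn
    rw [pyNumLen_eq_log _ (by omega)] at h
    have hlt : (n ^ 3).toNat < 10 ^ digits.toNat := by
      calc (n ^ 3).toNat < 10 ^ (Nat.log 10 (n ^ 3).toNat + 1) :=
            Nat.lt_pow_succ_log_self (by omega) _
        _ ≤ 10 ^ digits.toNat := Nat.pow_le_pow_right (by omega) (by omega)
    have h3 : n ≤ n ^ 3 := by
      calc n = n ^ 1 := (pow_one n).symm
        _ ≤ n ^ 3 := pow_le_pow_right₀ (by omega) (by omega)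
    have h4 : (n ^ 3) < (10 : Int) ^ digits.toNat := by zify at hlt; omega
    omega

-- the while-loop of A, step for step
def cubelistLoop (digits n : Int) (cubes : List Int) : List Int :=
  let cubes' := if pyNumLen (n ^ 3) = digits then cubes ++ [n ^ 3] else cubes
  if pyNumLen (n ^ 3) > digits then cubes'
  else cubelistLoop digits (n + 1) cubes'
termination_by ((10 : Int) ^ digits.toNat + 1 - n).toNat
decreasing_by
  have := cubelist_loop_bound digits n (by omega)
  omega

def cubelist (digits : Int) : List Int := cubelistLoop digits 1 []

-- ===== PORT B =====
-- bisection loop of icbrt in Source B; invariant lo**3 <= x < hi**3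
def icbrtLoop (x lo hi : Int) : Int :=
  if h : lo + 1 < hi then
    let mid := PySem.Int.floordiv (lo + hi) 2
    if mid ^ 3 ≤ x then icbrtLoop x mid hi else icbrtLoop x lo mid
  else lo
termination_by (hi - lo).toNat
decreasing_by
  · have h1 : lo + 1 ≤ PySem.Int.floordiv (lo + hi) 2 :=
      (PySem.Int.le_floordiv_iff_mul_le (by omega)).mpr (by omega)
    omega
  · have h2 : PySem.Int.floordiv (lo + hi) 2 < hi :=
      (PySem.Int.floordiv_lt_iff_lt_mul (by omega)).mpr (by omega)
    omega

-- largest r >= 0 with r**3 <= x (for x >= 0)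
def icbrt (x : Int) : Int := icbrtLoop x 0 (x + 1)

def cubelist_alt (digits : Int) : List Int :=
  if digits ≤ 0 then []
  else
    let first := icbrt ((10 : Int) ^ (digits - 1).toNat - 1) + 1
    let last := icbrt ((10 : Int) ^ digits.toNat - 1)
    (PySem.List.pyRange first (last + 1)).map (fun n => n ^ 3)

-- ===== PRECONDITION & SPEC =====
def Spec_cubelist (digits : Int) (out : List Int) : Prop := out = cubelist_alt digits
instance (digits : Int) (out : List Int) : Decidable (Spec_cubelist digits out) := by unfold Spec_cubelist; infer_instance

-- ===== CLAIM (what is proved, stated in full; the proofs are below) =====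
def Claim_equal_cubelist : Prop := ∀ (digits : Int), Dom_cubelist digits → Spec_cubelist digits (cubelist digits)

-- ===== LEMMAS AND PROOFS =====

-- the bisection returns the integer cube root
theorem icbrtLoop_spec (x : Int) : ∀ (lo hi : Int), 0 ≤ lo → lo < hi → lo ^ 3 ≤ x → x < hi ^ 3 →
    0 ≤ icbrtLoop x lo hi ∧ (icbrtLoop x lo hi) ^ 3 ≤ x ∧ x < (icbrtLoop x lo hi + 1) ^ 3 := by
  intro lo hi
  induction lo, hi using icbrtLoop.induct x with
  | case1 lo hi h mid hle ih =>
    intro h0 _ _ hhi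
    rw [icbrtLoop, dif_pos h, if_pos hle]
    have h1 : lo + 1 ≤ mid := (PySem.Int.le_floordiv_iff_mul_le (by omega)).mpr (by omega)
    exact ih (by omega) (by
      have : mid < hi := (PySem.Int.floordiv_lt_iff_lt_mul (by omega)).mpr (by omega)
      omega) hle hhi
  | case2 lo hi h mid hgt ih =>
    intro h0 hlh hlo _
    rw [icbrtLoop, dif_pos h, if_neg hgt]
    exact ih h0 (by
      have : lo + 1 ≤ mid := (PySem.Int.le_floordiv_iff_mul_le (by omega)).mpr (by omega)
      omega) hlo (by omega)
  | case3 lo hi h =>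
    intro h0 hlh hlo hhi
    rw [icbrtLoop, dif_neg h]
    have : hi = lo + 1 := by omega
    subst this
    exact ⟨h0, hlo, hhi⟩

theorem icbrt_spec (x : Int) (hx : 0 ≤ x) :
    0 ≤ icbrt x ∧ (icbrt x) ^ 3 ≤ x ∧ x < (icbrt x + 1) ^ 3 := by
  unfold icbrt
  exact icbrtLoop_spec x 0 (x + 1) le_rfl (by omega) (by simpa using hx) (by nlinarith [sq_nonneg x, hx])

-- m < 10^k  ↔  the decimal length of m is ≤ k   (for 1 ≤ m)
theorem lt_pow_iff_log_lt_int (m : Int) (hm : 1 ≤ m) (k : Nat) :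
    m < (10 : Int) ^ k ↔ Nat.log 10 m.toNat < k := by
  rw [← Nat.lt_pow_iff_log_lt (by omega) (by omega : m.toNat ≠ 0)]
  zify
  omega

-- A's loop collects exactly the cubes of max n L .. R
theorem cubelistLoop_eq (d L R : Int)
    (heq : ∀ n : Int, 1 ≤ n → (pyNumLen (n ^ 3) = d ↔ L ≤ n ∧ n ≤ R))
    (hgt : ∀ n : Int, 1 ≤ n → (pyNumLen (n ^ 3) > d ↔ R < n)) :
    ∀ (m : Nat) (n : Int) (acc : List Int), (R + 1 - n).toNat = m → 1 ≤ n → n ≤ R + 1 →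
      cubelistLoop d n acc =
        acc ++ (PySem.List.pyRange (max n L) (R + 1)).map (fun k => k ^ 3) := by
  intro m
  induction m using Nat.strong_induction_on with
  | _ m ih =>
    intro n acc hm h1 h2
    rcases eq_or_lt_of_le h2 with hend | hlt
    · -- n = R + 1 : the loop breaks, the range is empty
      have hg : pyNumLen (n ^ 3) > d := (hgt n h1).mpr (by omega)
      have hne : ¬ pyNumLen (n ^ 3) = d := by
        intro hc
        have := ((heq n h1).mp hc).2
        omega
      rw [cubelistLoop]
      simp only [if_neg hne, if_pos hg]
      have : ¬ max n L < R + 1 := by omega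
      simp [PySem.List.pyRange, this]
    · -- n ≤ R : the loop continues
      have hng : ¬ pyNumLen (n ^ 3) > d := by
        rw [hgt n h1]
        omega
      rw [cubelistLoop]
      simp only [if_neg hng]
      by_cases hin : L ≤ n
      · have hey : pyNumLen (n ^ 3) = d := (heq n h1).mpr ⟨hin, by omega⟩
        rw [if_pos hey,
          ih (R + 1 - (n + 1)).toNat (by omega) (n + 1) _ rfl (by omega) (by omega)]
        rw [max_eq_left hin, max_eq_left (by omega : L ≤ n + 1),
          PySem.List.pyRange_one_cons hlt]
        simp
      · have hnn : ¬ pyNumLen (n ^ 3) = d := by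
          rw [heq n h1]
          omega
        rw [if_neg hnn,
          ih (R + 1 - (n + 1)).toNat (by omega) (n + 1) _ rfl (by omega) (by omega)]
        rw [max_eq_right (by omega : n ≤ L), max_eq_right (by omega : n + 1 ≤ L)]

-- ===== VERDICT (by name: the statement is the Claim_ definition above) =====
theorem cubelist_spec : Claim_equal_cubelist := by
  intro digits _
  unfold Spec_cubelist cubelist cubelist_alt
  by_cases hd : digits ≤ 0
  · -- d ≤ 0: A breaks at once with an empty list
    rw [cubelistLoop, if_pos hd]
    rw [show pyNumLen ((1 : Int) ^ 3) = 1 from by decide]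
    rw [if_neg (by omega : ¬ (1 : Int) = digits), if_pos (by omega : (1 : Int) > digits)]
  · rw [if_neg hd]
    have hd1 : 1 ≤ digits := by omega
    set D : Nat := digits.toNat with hD
    have hDpos : 1 ≤ D := by omega
    have hDm : (digits - 1).toNat = D - 1 := by omega
    set LB : Int := (10 : Int) ^ (D - 1) with hLB
    set HB : Int := (10 : Int) ^ D with hHB
    have hLB1 : 1 ≤ LB := one_le_pow₀ (by omega)
    have hHBLB : LB ≤ HB := pow_le_pow_right₀ (by omega) (by omega)
    obtain ⟨hL0, hL1, hL2⟩ := icbrt_spec (LB - 1) (by omega)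
    obtain ⟨hR0, hR1, hR2⟩ := icbrt_spec (HB - 1) (by omega)
    set L : Int := icbrt (LB - 1) + 1 with hLdef
    set R : Int := icbrt (HB - 1) with hRdef
    have hL1' : (L - 1) ^ 3 ≤ LB - 1 := by
      have hll : L - 1 = icbrt (LB - 1) := by omega
      rw [hll]
      exact hL1
    -- digit-count brackets
    have hnum : ∀ n : Int, 1 ≤ n →
        (pyNumLen (n ^ 3) = digits ↔ LB ≤ n ^ 3 ∧ n ^ 3 < HB) ∧
        (pyNumLen (n ^ 3) > digits ↔ HB ≤ n ^ 3) := by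
      intro n hn
      have hc1 : (1 : Int) ≤ n ^ 3 := one_le_pow₀ hn
      rw [pyNumLen_eq_log _ (by omega)]
      have b1 := lt_pow_iff_log_lt_int (n ^ 3) hc1 D
      have b2 := lt_pow_iff_log_lt_int (n ^ 3) hc1 (D - 1)
      rw [← hHB] at b1
      rw [← hLB] at b2
      constructor
      · constructor
        · intro h
          have hlog : Nat.log 10 (n ^ 3).toNat = D - 1 := by omega
          constructor
          · by_contra hcon
            exact absurd (b2.mp (by omega)) (by omega)
          · exact b1.mpr (by omega)
        · rintro ⟨ha, hb⟩
          have l1 := b1.mp hb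
          have l2 : ¬ Nat.log 10 (n ^ 3).toNat < D - 1 := fun hc => by
            have := b2.mpr hc
            omega
          omega
      · constructor
        · intro h
          by_contra hcon
          exact absurd (b1.mp (by omega)) (by omega)
        · intro h
          have : ¬ Nat.log 10 (n ^ 3).toNat < D := fun hc => by
            have := b1.mpr hc
            omega
          omega
    -- cube-root brackets: translate the cube conditions to L ≤ n ≤ R
    have cubeLe : ∀ a b : Int, 0 ≤ a → 0 ≤ b → (a ≤ b ↔ a ^ 3 ≤ b ^ 3) := by
      intro a b ha hb
      constructor
      · intro h
        exact pow_le_pow_left₀ ha h 3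
      · intro h
        by_contra hc
        have : b + 1 ≤ a := by omega
        nlinarith [pow_le_pow_left₀ (by omega : (0:Int) ≤ b + 1) this 3]
    have heq : ∀ n : Int, 1 ≤ n → (pyNumLen (n ^ 3) = digits ↔ L ≤ n ∧ n ≤ R) := by
      intro n hn
      rw [(hnum n hn).1]
      constructor
      · rintro ⟨ha, hb⟩
        constructor
        · by_contra hc
          have hnl : n ≤ L - 1 := by omega
          have := (cubeLe n (L - 1) (by omega) (by omega)).mp hnl
          omega
        · by_contra hc
          have := (cubeLe (R + 1) n (by omega) (by omega)).mp (by omega)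
          omega
      · rintro ⟨ha, hb⟩
        have c1 : L ^ 3 ≤ n ^ 3 := (cubeLe L n (by omega) (by omega)).mp ha
        have c2 : n ^ 3 ≤ R ^ 3 := (cubeLe n R (by omega) hR0).mp hb
        omega
    have hgt : ∀ n : Int, 1 ≤ n → (pyNumLen (n ^ 3) > digits ↔ R < n) := by
      intro n hn
      rw [(hnum n hn).2]
      constructor
      · intro h
        by_contra hc
        have := (cubeLe n R (by omega) hR0).mp (by omega)
        omega
      · intro h
        have : R + 1 ≤ n := by omega
        have := (cubeLe (R + 1) n (by omega) (by omega)).mp this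
        omega
    have hR1n : 1 ≤ R + 1 := by omega
    rw [cubelistLoop_eq digits L R heq hgt (R + 1 - 1).toNat 1 [] rfl le_rfl hR1n]
    rw [hDm, max_eq_right (by omega : (1:Int) ≤ L)]
    simp [hLdef, hLB]
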